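-- pv_equiv track=rewrite | github.com/decajoin/algorithms-homework-2024 | HomeWork2/code/CodeA_1.py | find_max_blank_square_brute_force
-- ===== SOURCE A (Python) =====
-- def find_max_blank_square_brute_force(matrix, L):
--     M = len(matrix)
--     N = len(matrix[0])
--     max_count = -1
--     max_position = (-1, -1)
--
--     for i in range(M - L + 1):
--         for j in range(N - L + 1):
--             count = 0
--             for k in range(i, i + L):
--                 for l in range(j, j + L):
--                     if matrix[k][l] == 0:
--                         count += 1
--             if count > max_count:
--                 max_count = count
--                 max_position = (i + 1, j + 1)
--
--     return max_position, max_count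
-- ===== SOURCE B (Python) =====
-- def _prefix_row(prev, row, N):
--     # next prefix-sum row: cur[j] = zeros in row[:j] plus column-prefix carried from prev
--     cur = [0]
--     for j in range(N):
--         cur.append(cur[j] + prev[j + 1] - prev[j] + (1 if row[j] == 0 else 0))
--     return cur
--
-- def find_max_blank_square_brute_force(matrix, L):
--     M = len(matrix)
--     N = len(matrix[0])
--     if L <= 0:
--         # every window is empty: the first (top-left) window wins with 0 zeros
--         return (1, 1), 0
--     # P[i][j] = number of zeros in the first i rows restricted to the first j columns
--     P = [[0] * (N + 1)]
--     for row in matrix: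
--         P.append(_prefix_row(P[-1], row, N))
--     best_count = -1
--     best_pos = (-1, -1)
--     for i in range(M - L + 1):
--         for j in range(N - L + 1):
--             c = P[i + L][j + L] - P[i][j + L] - P[i + L][j] + P[i][j]
--             if c > best_count:
--                 best_count = c
--                 best_pos = (i + 1, j + 1)
--     return best_pos, best_count
-- ===== Notes on version B (the rewrite author's own statement) =====
-- stated objective: alternative
-- what changed: B precomputes a 2D prefix-sum table of zero counts once and evaluates each LxL window by inclusion-exclusion in O(1), instead of A's rescan of the L^2 cells of every window (not measurably faster on a timing run's input family).
-- outside the precondition, e.g. on find_max_blank_square_brute_force([[1, 0], [1]], 3): A returns ((-1, -1), -1), B raises IndexError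
import Mathlib
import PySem

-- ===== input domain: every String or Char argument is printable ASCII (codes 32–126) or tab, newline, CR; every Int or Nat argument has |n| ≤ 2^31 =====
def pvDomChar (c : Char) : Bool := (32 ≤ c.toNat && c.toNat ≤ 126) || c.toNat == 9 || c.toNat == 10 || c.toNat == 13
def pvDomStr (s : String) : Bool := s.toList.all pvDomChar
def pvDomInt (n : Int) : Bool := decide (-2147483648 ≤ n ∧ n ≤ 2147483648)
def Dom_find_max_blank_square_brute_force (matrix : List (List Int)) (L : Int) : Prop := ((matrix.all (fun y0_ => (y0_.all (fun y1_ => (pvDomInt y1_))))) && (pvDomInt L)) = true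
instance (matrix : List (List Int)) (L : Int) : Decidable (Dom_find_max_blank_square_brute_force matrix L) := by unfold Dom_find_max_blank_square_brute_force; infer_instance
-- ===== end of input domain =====

-- B replaces A's per-window rescan of the L^2 cells by a 2D prefix-sum table of zero counts,
-- read by inclusion-exclusion per window (objective: alternative algorithm).

-- ===== PORT A =====
def find_max_blank_square_brute_force (matrix : List (List Int)) (L : Int) : (Int × Int) × Int :=
  let M : Int := matrix.length
  let N : Int := (PySem.List.pyGetD matrix 0 []).length
  let st := (PySem.List.pyRange 0 (M - L + 1) 1).foldl (fun st i =>
    (PySem.List.pyRange 0 (N - L + 1) 1).foldl (fun st j =>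
      let count := (PySem.List.pyRange i (i + L) 1).foldl (fun count k =>
        (PySem.List.pyRange j (j + L) 1).foldl (fun count l =>
          if PySem.List.pyGetD (PySem.List.pyGetD matrix k []) l 1 = 0 then count + 1
          else count) count) 0
      if count > st.1 then (count, (i + 1, j + 1)) else st) st)
    ((-1 : Int), ((-1 : Int), (-1 : Int)))
  (st.2, st.1)

-- ===== PORT B =====
-- helper _prefix_row of Source B
def pvPrefixRow (prev row : List Int) (N : Int) : List Int :=
  (PySem.List.pyRange 0 N 1).foldl (fun cur j =>
    cur ++ [PySem.List.pyGetD cur j 0 + PySem.List.pyGetD prev (j + 1) 0 - PySem.List.pyGetD prev j 0 +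
      (if PySem.List.pyGetD row j 1 = 0 then 1 else 0)]) [0]

def find_max_blank_square_brute_force_alt (matrix : List (List Int)) (L : Int) : (Int × Int) × Int :=
  let M : Int := matrix.length
  let N : Int := (PySem.List.pyGetD matrix 0 []).length
  if L ≤ 0 then ((1, 1), 0) else
  let P : List (List Int) := matrix.foldl
    (fun P row => P ++ [pvPrefixRow (PySem.List.pyGetD P (-1) []) row N])
    [List.replicate (N + 1).toNat 0]
  let st := (PySem.List.pyRange 0 (M - L + 1) 1).foldl (fun st i =>
    (PySem.List.pyRange 0 (N - L + 1) 1).foldl (fun st j =>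
      let c := PySem.List.pyGetD (PySem.List.pyGetD P (i + L) []) (j + L) 0
             - PySem.List.pyGetD (PySem.List.pyGetD P i []) (j + L) 0
             - PySem.List.pyGetD (PySem.List.pyGetD P (i + L) []) j 0
             + PySem.List.pyGetD (PySem.List.pyGetD P i []) j 0
      if c > st.1 then (c, (i + 1, j + 1)) else st) st)
    ((-1 : Int), ((-1 : Int), (-1 : Int)))
  (st.2, st.1)

-- ===== PRECONDITION & SPEC =====
-- Pre_ excludes exactly the inputs where one of the two Pythons raises: the empty matrix (both index
-- matrix[0]) and, for positive L, a row shorter than the first row (B's prefix pass reads row[j] for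
-- every j < len(matrix[0]), and A's window scan can raise there too).
def Pre_find_max_blank_square_brute_force (matrix : List (List Int)) (L : Int) : Prop :=
  matrix ≠ [] ∧ (L ≤ 0 ∨ ∀ row ∈ matrix, (PySem.List.pyGetD matrix 0 []).length ≤ row.length)
instance (matrix : List (List Int)) (L : Int) : Decidable (Pre_find_max_blank_square_brute_force matrix L) := by unfold Pre_find_max_blank_square_brute_force; infer_instance
def pvWitness_find_max_blank_square_brute_force : List (List Int) × Int := ([[0, 1], [1, 0]], 1)

def Spec_find_max_blank_square_brute_force (matrix : List (List Int)) (L : Int) (out : (Int × Int) × Int) : Prop := out = find_max_blank_square_brute_force_alt matrix L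
instance (matrix : List (List Int)) (L : Int) (out : (Int × Int) × Int) : Decidable (Spec_find_max_blank_square_brute_force matrix L out) := by unfold Spec_find_max_blank_square_brute_force; infer_instance

-- ===== CLAIM (what is proved, stated in full; the proofs are below) =====
def Claim_equal_find_max_blank_square_brute_force : Prop := ∀ (matrix : List (List Int)) (L : Int), Dom_find_max_blank_square_brute_force matrix L → Pre_find_max_blank_square_brute_force matrix L → Spec_find_max_blank_square_brute_force matrix L (find_max_blank_square_brute_force matrix L)

-- ===== LEMMAS AND PROOFS =====

-- indicator of a zero entry, count of zeros in a row prefix, and the 2D prefix count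
def pvZ (row : List Int) (l : Nat) : Int := if row.getD l 1 = 0 then 1 else 0
def pvRC (row : List Int) (j : Nat) : Int := ∑ l ∈ Finset.range j, pvZ row l
def pvPR (matrix : List (List Int)) (i j : Nat) : Int := ∑ k ∈ Finset.range i, pvRC (matrix.getD k []) j
def pvRowC (matrix : List (List Int)) (NN i : Nat) : List Int :=
  (List.range (NN + 1)).map (fun j => pvPR matrix i j)
def pvChain (prev : List Int) (rows : List (List Int)) (N : Int) : List (List Int) :=
  match rows with
  | [] => []
  | r :: rs => pvPrefixRow prev r N :: pvChain (pvPrefixRow prev r N) rs N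

theorem pv_getD_map_range {α : Type} (f : Nat → α) (n k : Nat) (d : α) (hk : k < n) :
    (((List.range n).map f).getD k d) = f k := by
  simp [List.getD, hk]

theorem pv_sum_range {M : Type} [AddCommMonoid M] (f : Nat → M) (n : Nat) :
    ((List.range n).map f).sum = ∑ k ∈ Finset.range n, f k := by
  induction n with
  | zero => simp
  | succ n ih => simp [List.range_succ, Finset.sum_range_succ, ih]

theorem pv_sum_range_add (g : Nat → Int) (m n : Nat) :
    ∑ k ∈ Finset.range (m + n), g k
      = (∑ k ∈ Finset.range m, g k) + ∑ k ∈ Finset.range n, g (m + k) := by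
  induction n with
  | zero => simp
  | succ n ih => rw [← Nat.add_assoc, Finset.sum_range_succ, Finset.sum_range_succ, ih]; ring

theorem pv_foldl_if {α : Type} (l : List α) (q : α → Prop) [DecidablePred q] (c0 : Int) :
    l.foldl (fun c x => if q x then c + 1 else c) c0
      = c0 + (l.map (fun x => if q x then (1 : Int) else 0)).sum := by
  induction l generalizing c0 with
  | nil => simp
  | cons a t ih =>
    simp only [List.foldl_cons, List.map_cons, List.sum_cons, ih]
    split <;> ring

-- A's window scan is the double sum of zero indicators over the window
theorem pv_countA (matrix : List (List Int)) (iN jN LN : Nat) :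
    (PySem.List.pyRange (iN : Int) ((iN : Int) + (LN : Int)) 1).foldl (fun count k =>
      (PySem.List.pyRange (jN : Int) ((jN : Int) + (LN : Int)) 1).foldl (fun count l =>
        if PySem.List.pyGetD (PySem.List.pyGetD matrix k []) l 1 = 0 then count + 1
        else count) count) 0
    = ∑ k ∈ Finset.range LN, ∑ l ∈ Finset.range LN, pvZ (matrix.getD (iN + k) []) (jN + l) := by
  rw [PySem.List.pyRange_one (iN : Int) ((iN : Int) + (LN : Int)),
      PySem.List.pyRange_one (jN : Int) ((jN : Int) + (LN : Int))]
  simp only [add_sub_cancel_left, Int.toNat_natCast, List.foldl_map]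
  simp only [pv_foldl_if]
  rw [PySem.List.foldl_add]
  simp only [zero_add, pv_sum_range]
  apply Finset.sum_congr rfl
  intro k _
  apply Finset.sum_congr rfl
  intro l _
  simp only [← Nat.cast_add, PySem.List.pyGetD_natCast, pvZ]

theorem pv_prefixRow_aux (prev row : List Int) (n : Nat) :
    (List.range n).foldl (fun cur (j : Nat) =>
        cur ++ [PySem.List.pyGetD cur (j : Int) 0 + PySem.List.pyGetD prev ((j : Int) + 1) 0
          - PySem.List.pyGetD prev (j : Int) 0
          + (if PySem.List.pyGetD row (j : Int) 1 = 0 then 1 else 0)]) [0]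
      = (List.range (n + 1)).map (fun j => prev.getD j 0 - prev.getD 0 0 + pvRC row j) := by
  induction n with
  | zero => simp [pvRC]
  | succ n ih =>
    rw [List.range_succ, List.foldl_append, ih]
    rw [List.range_succ (n := n + 1), List.map_append]
    simp only [List.foldl_cons, List.foldl_nil, ← Nat.cast_add_one, PySem.List.pyGetD_natCast,
      List.map_cons, List.map_nil]
    rw [pv_getD_map_range _ _ _ _ (by omega)]
    congr 1
    simp only [pvRC, Finset.sum_range_succ, pvZ]
    ring_nf

theorem pv_prefixRow (prev row : List Int) (NN : Nat) :
    pvPrefixRow prev row (NN : Int)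
      = (List.range (NN + 1)).map (fun j => prev.getD j 0 - prev.getD 0 0 + pvRC row j) := by
  unfold pvPrefixRow
  rw [PySem.List.pyRange_one]
  simp only [sub_zero, Int.toNat_natCast, List.foldl_map, zero_add]
  exact pv_prefixRow_aux prev row NN

theorem pv_step_row (matrix : List (List Int)) (NN i : Nat) :
    pvPrefixRow (pvRowC matrix NN i) (matrix.getD i []) (NN : Int) = pvRowC matrix NN (i + 1) := by
  rw [pv_prefixRow]
  unfold pvRowC
  apply List.map_congr_left
  intro j hj
  have hj' : j < NN + 1 := List.mem_range.mp hj
  rw [pv_getD_map_range _ _ _ _ hj', pv_getD_map_range _ _ _ _ (by omega)]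
  simp only [pvPR, pvRC, Finset.sum_range_succ, Finset.sum_range_zero, Finset.sum_const_zero]
  ring

theorem pv_build (N : Int) (rows : List (List Int)) : ∀ (acc : List (List Int)) (h : acc ≠ []),
    rows.foldl (fun P row => P ++ [pvPrefixRow (PySem.List.pyGetD P (-1) []) row N]) acc
      = acc ++ pvChain (acc.getLast h) rows N := by
  induction rows with
  | nil => intro acc h; simp [pvChain]
  | cons r rs ih =>
    intro acc h
    simp only [List.foldl_cons]
    rw [PySem.List.pyGetD_neg_one (h := h)]
    rw [ih (acc ++ [pvPrefixRow (acc.getLast h) r N]) (by simp)]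
    have hlast : (acc ++ [pvPrefixRow (acc.getLast h) r N]).getLast (by simp) =
        pvPrefixRow (acc.getLast h) r N := by
      simp
    rw [hlast]
    simp [pvChain, List.append_assoc]

theorem pv_chain_spec (matrix : List (List Int)) (NN : Nat) (rows : List (List Int)) :
    ∀ (i : Nat), matrix.drop i = rows →
    pvChain (pvRowC matrix NN i) rows (NN : Int)
      = (List.range rows.length).map (fun t => pvRowC matrix NN (i + 1 + t)) := by
  induction rows with
  | nil => intro i _; simp [pvChain]
  | cons r rs ih =>
    intro i hdrop
    have hr : matrix.getD i [] = r := by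
      have h0 : matrix[i]? = some r := by
        have h1 : (List.drop i matrix)[0]? = matrix[i + 0]? := List.getElem?_drop
        rw [hdrop] at h1
        simpa using h1.symm
      simp [List.getD, h0]
    have hdrop' : matrix.drop (i + 1) = rs := by
      have h2 : List.drop 1 (List.drop i matrix) = List.drop (i + 1) matrix := List.drop_drop
      rw [hdrop] at h2
      simpa using h2.symm
    simp only [pvChain]
    rw [← hr, pv_step_row, ih (i + 1) hdrop']
    rw [List.length_cons, List.range_succ_eq_map]
    simp only [List.map_cons, List.map_map, Function.comp_def]
    refine List.cons_eq_cons.mpr ⟨by norm_num, ?_⟩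
    apply List.map_congr_left
    intro t _
    congr 1
    omega

theorem pv_row_zero (matrix : List (List Int)) (NN : Nat) :
    pvRowC matrix NN 0 = List.replicate (NN + 1) 0 := by
  simp [pvRowC, pvPR, List.map_const']

-- the prefix table built by B's loop, row by row
theorem pv_P (matrix : List (List Int)) (NN : Nat) :
    matrix.foldl (fun P row => P ++ [pvPrefixRow (PySem.List.pyGetD P (-1) []) row (NN : Int)])
        [List.replicate (NN + 1) 0]
      = (List.range (matrix.length + 1)).map (fun i => pvRowC matrix NN i) := by
  rw [pv_build (NN : Int) matrix [List.replicate (NN + 1) 0] (by simp)]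
  have hlast : ([List.replicate (NN + 1) (0 : Int)]).getLast (by simp) = pvRowC matrix NN 0 := by
    simp [pv_row_zero]
  rw [hlast, ← pv_row_zero matrix NN, pv_chain_spec matrix NN matrix 0 (by simp)]
  rw [List.range_succ_eq_map]
  simp only [List.map_cons, List.map_map, Function.comp_def, List.singleton_append]
  refine List.cons_eq_cons.mpr ⟨rfl, ?_⟩
  apply List.map_congr_left
  intro t _
  congr 1
  omega

-- inclusion-exclusion on the prefix counts equals the window sum
theorem pv_window (matrix : List (List Int)) (iN jN LN : Nat) :
    pvPR matrix (iN + LN) (jN + LN) - pvPR matrix iN (jN + LN)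
      - pvPR matrix (iN + LN) jN + pvPR matrix iN jN
    = ∑ k ∈ Finset.range LN, ∑ l ∈ Finset.range LN, pvZ (matrix.getD (iN + k) []) (jN + l) := by
  have inner : ∀ r : List Int,
      ∑ l ∈ Finset.range LN, pvZ r (jN + l) = pvRC r (jN + LN) - pvRC r jN := by
    intro r
    simp only [pvRC]
    rw [pv_sum_range_add (fun l => pvZ r l) jN LN]
    ring
  rw [Finset.sum_congr rfl (fun k _ => inner (matrix.getD (iN + k) [])), Finset.sum_sub_distrib]
  simp only [pvPR]
  rw [pv_sum_range_add (fun k => pvRC (matrix.getD k []) (jN + LN)) iN LN,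
      pv_sum_range_add (fun k => pvRC (matrix.getD k []) jN) iN LN]
  ring

-- B's inclusion-exclusion read of the prefix table equals the window sum
theorem pv_countB (matrix : List (List Int)) (NN iN jN LN : Nat)
    (hi : iN + LN ≤ matrix.length) (hj : jN + LN ≤ NN) :
    PySem.List.pyGetD (PySem.List.pyGetD ((List.range (matrix.length + 1)).map
        (fun i => pvRowC matrix NN i)) ((iN : Int) + (LN : Int)) []) ((jN : Int) + (LN : Int)) 0
      - PySem.List.pyGetD (PySem.List.pyGetD ((List.range (matrix.length + 1)).map
        (fun i => pvRowC matrix NN i)) (iN : Int) []) ((jN : Int) + (LN : Int)) 0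
      - PySem.List.pyGetD (PySem.List.pyGetD ((List.range (matrix.length + 1)).map
        (fun i => pvRowC matrix NN i)) ((iN : Int) + (LN : Int)) []) (jN : Int) 0
      + PySem.List.pyGetD (PySem.List.pyGetD ((List.range (matrix.length + 1)).map
        (fun i => pvRowC matrix NN i)) (iN : Int) []) (jN : Int) 0
    = ∑ k ∈ Finset.range LN, ∑ l ∈ Finset.range LN, pvZ (matrix.getD (iN + k) []) (jN + l) := by
  have hget : ∀ (a b : Nat), a ≤ matrix.length → b ≤ NN →
      PySem.List.pyGetD (PySem.List.pyGetD ((List.range (matrix.length + 1)).map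
        (fun i => pvRowC matrix NN i)) (a : Int) []) (b : Int) 0 = pvPR matrix a b := by
    intro a b ha hb
    simp only [PySem.List.pyGetD_natCast]
    rw [pv_getD_map_range _ _ _ _ (by omega)]
    simp only [pvRowC]
    rw [pv_getD_map_range _ _ _ _ (by omega)]
  rw [show ((iN : Int) + (LN : Int)) = ((iN + LN : Nat) : Int) by push_cast; ring,
      show ((jN : Int) + (LN : Int)) = ((jN + LN : Nat) : Int) by push_cast; ring,
      hget _ _ (by omega) (by omega), hget _ _ (by omega) (by omega),
      hget _ _ (by omega) (by omega), hget _ _ (by omega) (by omega)]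
  exact pv_window matrix iN jN LN

theorem pv_fold_id {α β : Type} (l : List α) (g : β → α → β) (st : β) (h : ∀ x, g st x = st) :
    l.foldl g st = st := by
  induction l with
  | nil => rfl
  | cons a t ih => rw [List.foldl_cons, h a]; exact ih

-- with L ≤ 0 every window is empty: A's scan keeps the very first (top-left) window with 0 zeros
theorem pv_A_degenerate (matrix : List (List Int)) (L : Int) (hne : matrix ≠ []) (hL : L ≤ 0) :
    find_max_blank_square_brute_force matrix L = ((1, 1), 0) := by
  have hM : (1 : Int) ≤ matrix.length := by
    cases matrix with
    | nil => exact absurd rfl hne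
    | cons a t => simp
  have hnil : ∀ i : Int, PySem.List.pyRange i (i + L) 1 = [] :=
    fun i => PySem.List.pyRange_one_eq_nil (by omega)
  have ho : PySem.List.pyRange 0 ((matrix.length : Int) - L + 1) 1
      = 0 :: PySem.List.pyRange 1 ((matrix.length : Int) - L + 1) 1 :=
    PySem.List.pyRange_one_cons (by omega)
  have hi2 : PySem.List.pyRange 0 (((PySem.List.pyGetD matrix 0 []).length : Int) - L + 1) 1
      = 0 :: PySem.List.pyRange 1 (((PySem.List.pyGetD matrix 0 []).length : Int) - L + 1) 1 :=
    PySem.List.pyRange_one_cons (by omega)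
  simp only [find_max_blank_square_brute_force, hnil, List.foldl_nil, ho, hi2, List.foldl_cons]
  norm_num
  have hid : ∀ (l : List Int) (a : Int),
      l.foldl (fun (st : Int × Int × Int) j => if st.1 < 0 then ((0 : Int), a, j + 1) else st)
        (0, 1, 1) = (0, 1, 1) := by
    intro l a
    apply pv_fold_id
    intro x
    norm_num
  rw [hid, pv_fold_id]
  · exact ⟨rfl, rfl⟩
  · intro x
    norm_num
    exact hid _ _

-- ===== VERDICT (by name: the statement is the Claim_ definition above) =====
theorem find_max_blank_square_brute_force_spec : Claim_equal_find_max_blank_square_brute_force := by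
  intro matrix L _hDom hPre
  obtain ⟨hne, halt⟩ := hPre
  unfold Spec_find_max_blank_square_brute_force
  by_cases hL0 : L ≤ 0
  · rw [pv_A_degenerate matrix L hne hL0]
    simp only [find_max_blank_square_brute_force_alt]
    rw [if_pos hL0]
  have hL : 0 ≤ L := by omega
  obtain ⟨LN, rfl⟩ : ∃ LN : Nat, L = (LN : Int) := ⟨L.toNat, (Int.toNat_of_nonneg hL).symm⟩
  simp only [find_max_blank_square_brute_force, find_max_blank_square_brute_force_alt]
  rw [if_neg hL0]
  refine congrArg (fun st : Int × (Int × Int) => (st.2, st.1)) ?_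
  have ht : (((PySem.List.pyGetD matrix 0 []).length : Int) + 1).toNat
      = (PySem.List.pyGetD matrix 0 []).length + 1 := by omega
  rw [ht, pv_P matrix (PySem.List.pyGetD matrix 0 []).length]
  apply PySem.List.foldl_congr_mem
  intro st i hi
  apply PySem.List.foldl_congr_mem
  intro st' j hj
  obtain ⟨hi0, hiU⟩ := PySem.List.mem_pyRange_one.mp hi
  obtain ⟨hj0, hjU⟩ := PySem.List.mem_pyRange_one.mp hj
  obtain ⟨iN, rfl⟩ : ∃ iN : Nat, i = (iN : Int) := ⟨i.toNat, (Int.toNat_of_nonneg hi0).symm⟩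
  obtain ⟨jN, rfl⟩ : ∃ jN : Nat, j = (jN : Int) := ⟨j.toNat, (Int.toNat_of_nonneg hj0).symm⟩
  rw [pv_countA matrix iN jN LN,
      pv_countB matrix (PySem.List.pyGetD matrix 0 []).length iN jN LN (by omega) (by omega)]
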